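-- pv_equiv track=rewrite | github.com/saharadoesdev/codepath-tip102-solutions | Week 01/Session 1 (01-01)/advanced_problems.py | local_maximums
-- ===== SOURCE A (Python) =====
-- def local_maximums(grid):
--     """
--     Description.
--
--     Args:
--         variable (type): Description.
--     """
--     # Create empty result matrix based on original size
--     n = len(grid[0]) - 2
--     result_matrix = [[0] * n for _ in range(n)]
--
--     for i in range(n):
--         for j in range(n):
--             # Find local max
--             local_max = grid[i][j]
--             # Check 3x3 centered at i+1,j+1
--             for i2 in range(i, i + 3):
--                 for j2 in range(j, j + 3):
--                     val = grid[i2][j2]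
--                     if val > local_max:
--                         local_max = val
--             result_matrix[i][j] = local_max
--
--     return result_matrix
-- ===== SOURCE B (Python) =====
-- def local_maximums(grid):
--     # Separable two-pass max: horizontal 3-window maxes, then vertical 3-window maxes over that table.
--     n = len(grid[0]) - 2
--     H = [[max(grid[i][j], grid[i][j + 1], grid[i][j + 2]) for j in range(n)]
--          for i in range(n + 2)]
--     return [[max(H[i][j], H[i + 1][j], H[i + 2][j]) for j in range(n)]
--             for i in range(n)]
-- ===== Notes on version B (the rewrite author's own statement) =====
-- stated objective: faster
-- what changed: Replaces the 9-cell scan per window with a separable two-pass max: a horizontal 3-window max table H, then vertical 3-window maxes over H.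
import Mathlib
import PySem

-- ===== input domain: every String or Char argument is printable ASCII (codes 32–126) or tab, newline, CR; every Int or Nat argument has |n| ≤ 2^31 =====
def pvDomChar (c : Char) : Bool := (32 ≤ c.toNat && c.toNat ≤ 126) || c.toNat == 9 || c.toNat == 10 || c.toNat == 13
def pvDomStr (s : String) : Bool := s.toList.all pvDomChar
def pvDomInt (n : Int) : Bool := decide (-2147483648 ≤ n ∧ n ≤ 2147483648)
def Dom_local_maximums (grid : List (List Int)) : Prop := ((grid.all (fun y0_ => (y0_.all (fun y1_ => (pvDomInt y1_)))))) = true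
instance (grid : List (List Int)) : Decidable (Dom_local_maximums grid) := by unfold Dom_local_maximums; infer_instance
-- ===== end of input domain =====

-- B replaces A's 9-cell scan per window with a separable two-pass max (horizontal 3-window table, then vertical): fewer comparisons per cell.


-- n = len(grid[0]) - 2, shared by both ports
def pvN (grid : List (List Int)) : Int := ((grid.headD []).length : Int) - 2

-- grid[i][j] (indices are in range whenever Pre_ holds)
def gget (grid : List (List Int)) (i j : Int) : Int :=
  PySem.List.pyGetD (PySem.List.pyGetD grid i []) j 0

-- ===== PORT A =====
-- the innermost 3x3 scan of A, with local_max initialised to grid[i][j]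
def cellA (grid : List (List Int)) (i j : Int) : Int :=
  (PySem.List.pyRange i (i + 3) 1).foldl (fun lm i2 =>
    (PySem.List.pyRange j (j + 3) 1).foldl (fun lm j2 =>
      if gget grid i2 j2 > lm then gget grid i2 j2 else lm) lm)
    (gget grid i j)

def local_maximums (grid : List (List Int)) : List (List Int) :=
  (PySem.List.pyRange 0 (pvN grid) 1).map (fun i =>
    (PySem.List.pyRange 0 (pvN grid) 1).map (fun j => cellA grid i j))

-- ===== PORT B =====
-- one row of the horizontal 3-window max table H
def hRow (grid : List (List Int)) (i : Int) : List Int :=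
  (PySem.List.pyRange 0 (pvN grid) 1).map (fun j =>
    max (max (gget grid i j) (gget grid i (j + 1))) (gget grid i (j + 2)))

def local_maximums_alt (grid : List (List Int)) : List (List Int) :=
  let H : List (List Int) :=
    (PySem.List.pyRange 0 (pvN grid + 2) 1).map (fun i => hRow grid i)
  (PySem.List.pyRange 0 (pvN grid) 1).map (fun i =>
    (PySem.List.pyRange 0 (pvN grid) 1).map (fun j =>
      max (max (PySem.List.pyGetD (PySem.List.pyGetD H i []) j 0)
               (PySem.List.pyGetD (PySem.List.pyGetD H (i + 1) []) j 0))
          (PySem.List.pyGetD (PySem.List.pyGetD H (i + 2) []) j 0)))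

-- ===== PRECONDITION & SPEC =====
-- Pre_ excludes exactly the inputs where Python A raises IndexError: the empty grid,
-- and grids where some accessed row/column index (rows 0..n+1, columns 0..n+1) is out of range.
def Pre_local_maximums (grid : List (List Int)) : Prop :=
  grid ≠ [] ∧
  ((grid.headD []).length ≤ 2 ∨
    ((grid.headD []).length ≤ grid.length ∧
      ∀ row ∈ grid.take (grid.headD []).length, (grid.headD []).length ≤ row.length))
instance (grid : List (List Int)) : Decidable (Pre_local_maximums grid) := by
  unfold Pre_local_maximums; infer_instance

def pvWitness_local_maximums : List (List Int) := [[1, 2, 3], [4, 5, 6], [7, 8, 9]]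

def Spec_local_maximums (grid : List (List Int)) (out : List (List Int)) : Prop := out = local_maximums_alt grid
instance (grid : List (List Int)) (out : List (List Int)) : Decidable (Spec_local_maximums grid out) := by unfold Spec_local_maximums; infer_instance

-- ===== CLAIM (what is proved, stated in full; the proofs are below) =====
def Claim_equal_local_maximums : Prop := ∀ (grid : List (List Int)), Dom_local_maximums grid → Pre_local_maximums grid → Spec_local_maximums grid (local_maximums grid)

-- ===== LEMMAS AND PROOFS =====
lemma pyRange_three (a : Int) : PySem.List.pyRange a (a + 3) 1 = [a, a + 1, a + 2] := by
  have h : (a + 3 - a).toNat = 3 := by omega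
  rw [PySem.List.pyRange_one, h]
  norm_num [List.range_succ]

lemma cellA_eq (grid : List (List Int)) (i j : Int) :
    cellA grid i j =
      max (max (max (max (gget grid i j) (gget grid i (j + 1))) (gget grid i (j + 2)))
               (max (max (gget grid (i + 1) j) (gget grid (i + 1) (j + 1))) (gget grid (i + 1) (j + 2))))
          (max (max (gget grid (i + 2) j) (gget grid (i + 2) (j + 1))) (gget grid (i + 2) (j + 2))) := by
  have hmax : ∀ a b : Int, (if a > b then a else b) = max b a := by
    intro a b; by_cases h : a > b <;> simp [h] <;> omega
  simp only [cellA, pyRange_three, List.foldl, hmax, max_self]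
  ac_rfl

-- ===== VERDICT (by name: the statement is the Claim_ definition above) =====
theorem local_maximums_spec : Claim_equal_local_maximums := by
  intro grid _ _
  unfold Spec_local_maximums local_maximums local_maximums_alt
  refine List.map_congr_left (fun i hi => List.map_congr_left (fun j hj => ?_))
  rw [PySem.List.mem_pyRange_one] at hi hj
  rw [PySem.List.pyGetD_map_pyRange_of_nonneg _ _ _ _ hi.1 (by omega),
      PySem.List.pyGetD_map_pyRange_of_nonneg _ _ _ _ (by omega) (by omega),
      PySem.List.pyGetD_map_pyRange_of_nonneg _ _ _ _ (by omega) (by omega)]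
  unfold hRow
  rw [PySem.List.pyGetD_map_pyRange_of_nonneg _ _ _ _ hj.1 hj.2,
      PySem.List.pyGetD_map_pyRange_of_nonneg _ _ _ _ hj.1 hj.2,
      PySem.List.pyGetD_map_pyRange_of_nonneg _ _ _ _ hj.1 hj.2]
  exact cellA_eq grid i j
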